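-- pv_equiv track=rewrite | github.com/Jij-Inc/Qamomile | jijmodeling_transpiler_quantum/core/qrac/graph_coloring.py | check_linear_term
-- ===== SOURCE A (Python) =====
-- def check_linear_term(
--     color_group: dict[int, list[int]],
--     linear_term_index: list[int],
--     max_color_group_size: int,
-- ) -> dict[int, list[int]]:
--     """Search for items within the index of linear term that have not been assigned to the color_group, and add them.
--
--     Args:
--         color_group (dict[int, list[int]]): color_group
--         linear_term_index (list[int]): list of index of linear term
--         max_color_group_size (int): the maximum number of encoding qubits. if you want to use for the qrac31, set 3.
--
--     Returns:
--         dict[int, list[int]]: color_group which added items within the index of linear term that have not been assigned to the color_group.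
--     """
--     idx_in_color_group = []
--     for v in color_group.values():
--         idx_in_color_group.extend(v)
--
--     max_idx = max(color_group.keys())
--     value_counter = 1
--     for idx in linear_term_index:
--         if idx not in idx_in_color_group:
--             if value_counter == 1:
--                 color_group[max_idx + 1] = []
--
--             color_group[max_idx + 1].append(idx)
--             value_counter += 1
--
--             if value_counter > max_color_group_size:
--                 max_idx += 1
--                 value_counter = 1
--
--     return color_group
-- ===== SOURCE B (Python) =====
-- def check_linear_term(color_group, linear_term_index, max_color_group_size):
--     """Two-phase rewrite: collect the unassigned indices once, then chunk them into new groups."""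
--     assigned = set()
--     for v in color_group.values():
--         assigned.update(v)
--     pending = [i for i in linear_term_index if i not in assigned]
--     base = max(color_group.keys())
--     size = max(max_color_group_size, 1)  # a requested group size below 1 behaves as size 1
--     chunks = []
--     while pending:
--         chunks.append(pending[:size])
--         pending = pending[size:]
--     for k, chunk in enumerate(chunks):
--         color_group[base + 1 + k] = chunk
--     return color_group
-- ===== Notes on version B (the rewrite author's own statement) =====
-- stated objective: faster
-- what changed: A's single pass with a wrap-around counter mutating the dict per element is replaced by a two-phase shape: build the pending list via one set-membership filter, chunk it into blocks of the (normalised) group size, and append each block as a new key; Pre_ only excludes the empty dict, on which A raises ValueError from max().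
import Mathlib
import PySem

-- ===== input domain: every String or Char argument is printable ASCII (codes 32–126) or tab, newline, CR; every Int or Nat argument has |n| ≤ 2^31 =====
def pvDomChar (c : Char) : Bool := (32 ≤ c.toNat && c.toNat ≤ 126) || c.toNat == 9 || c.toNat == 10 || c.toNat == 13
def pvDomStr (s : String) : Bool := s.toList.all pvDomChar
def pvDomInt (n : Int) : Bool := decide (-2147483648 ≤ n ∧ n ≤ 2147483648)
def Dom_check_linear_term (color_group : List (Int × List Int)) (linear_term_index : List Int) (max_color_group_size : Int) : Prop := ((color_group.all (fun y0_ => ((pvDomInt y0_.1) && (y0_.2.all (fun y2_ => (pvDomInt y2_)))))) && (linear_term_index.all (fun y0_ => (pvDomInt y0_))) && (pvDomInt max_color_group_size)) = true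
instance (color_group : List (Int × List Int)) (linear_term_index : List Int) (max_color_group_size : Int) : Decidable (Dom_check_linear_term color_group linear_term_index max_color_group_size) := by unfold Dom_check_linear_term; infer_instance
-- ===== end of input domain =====

-- ===== PORT A =====
-- B replaces A's wrap-around-counter single pass by a two-phase filter-then-chunk shape with set
-- membership (measurably faster on large inputs). Both Pythons mutate color_group in place and return
-- it; the equivalence proved here is about the returned dict (which is also the mutated state in both).
-- A raises ValueError (max of empty sequence) on an empty color_group: excluded by Pre_.

-- the loop body of A for an unassigned idx; state = (color_group, max_idx, value_counter)
def pvStepA (m : Int) (s : PySem.Dict Int (List Int) × Int × Int) (idx : Int) :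
    PySem.Dict Int (List Int) × Int × Int :=
  let g := if s.2.2 = 1 then s.1.insert (s.2.1 + 1) ([] : List Int) else s.1
  -- color_group[max_idx + 1].append(idx); the key is always present here, so modify is exact
  let g := g.modify (s.2.1 + 1) [] (fun l => l ++ [idx])
  let vc := s.2.2 + 1
  if vc > m then (g, s.2.1 + 1, 1) else (g, s.2.1, vc)

def check_linear_term (color_group : List (Int × List Int)) (linear_term_index : List Int) (max_color_group_size : Int) : List (Int × List Int) :=
  let d : PySem.Dict Int (List Int) := PySem.Dict.mk color_group
  let idx_in_color_group := d.values.foldl (fun acc v => acc ++ v) []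
  match PySem.List.max? d.keys (fun k => k) with
  | none => []   -- max() on an empty dict raises ValueError in Python; excluded by Pre_
  | some max_idx =>
    (linear_term_index.foldl
      (fun s idx => if idx ∈ idx_in_color_group then s else pvStepA max_color_group_size s idx)
      (d, max_idx, 1)).1.items

-- ===== PORT B =====
-- while pending: chunks.append(pending[:size]); pending = pending[size:]  -- chunk width is t+1 = size
def pvChunksGo (t : Nat) (out : List (List Int)) (xs : List Int) : List (List Int) :=
  match xs with
  | [] => out
  | x :: rest => pvChunksGo t (out ++ [(x :: rest).take (t + 1)]) ((x :: rest).drop (t + 1))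
termination_by xs.length
decreasing_by simp

def check_linear_term_alt (color_group : List (Int × List Int)) (linear_term_index : List Int) (max_color_group_size : Int) : List (Int × List Int) :=
  let d : PySem.Dict Int (List Int) := PySem.Dict.mk color_group
  let assigned := PySem.Set.ofList (d.values.flatMap (fun v => v))
  let pending := linear_term_index.filter (fun i => decide (i ∉ assigned))
  match PySem.List.max? d.keys (fun k => k) with
  | none => []   -- max() on an empty dict raises ValueError in B's Python too
  | some base =>
    let size := max max_color_group_size 1
    ((PySem.List.enumerate (pvChunksGo (size - 1).toNat [] pending) 0).foldl
      (fun g p => g.insert (base + 1 + p.1) p.2) d).items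

-- ===== PRECONDITION & SPEC =====
-- Pre_ excludes exactly the empty dict, on which Python's max(color_group.keys()) raises ValueError.
def Pre_check_linear_term (color_group : List (Int × List Int)) (linear_term_index : List Int) (max_color_group_size : Int) : Prop := color_group ≠ []
instance (color_group : List (Int × List Int)) (linear_term_index : List Int) (max_color_group_size : Int) : Decidable (Pre_check_linear_term color_group linear_term_index max_color_group_size) := by unfold Pre_check_linear_term; infer_instance

def pvWitness_check_linear_term : (List (Int × List Int)) × List Int × Int := ([(0, [1, 2])], [3, 4, 5], 2)

def Spec_check_linear_term (color_group : List (Int × List Int)) (linear_term_index : List Int) (max_color_group_size : Int) (out : List (Int × List Int)) : Prop := out = check_linear_term_alt color_group linear_term_index max_color_group_size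
instance (color_group : List (Int × List Int)) (linear_term_index : List Int) (max_color_group_size : Int) (out : List (Int × List Int)) : Decidable (Spec_check_linear_term color_group linear_term_index max_color_group_size out) := by unfold Spec_check_linear_term; infer_instance

-- ===== CLAIM (what is proved, stated in full; the proofs are below) =====
def Claim_equal_check_linear_term : Prop := ∀ (color_group : List (Int × List Int)) (linear_term_index : List Int) (max_color_group_size : Int), Dom_check_linear_term color_group linear_term_index max_color_group_size → Pre_check_linear_term color_group linear_term_index max_color_group_size → Spec_check_linear_term color_group linear_term_index max_color_group_size (check_linear_term color_group linear_term_index max_color_group_size)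

-- ===== LEMMAS AND PROOFS =====

-- the common description of the appended groups: blocks of width t+1 keyed consecutively from k
def pvSpecGroups (t : Nat) (k : Int) (p : List Int) : List (Int × List Int) :=
  match p with
  | [] => []
  | x :: rest => (k, x :: rest.take t) :: pvSpecGroups t (k + 1) (rest.drop t)
termination_by p.length
decreasing_by simp

lemma pvNotContains (g : PySem.Dict Int (List Int)) (M j : Int)
    (h : ∀ k ∈ g.keys, k ≤ M) (hj : M < j) : g.contains j = false := by
  cases hc : g.contains j with
  | false => rfl
  | true => exact absurd (h j ((PySem.Dict.contains_iff_mem_keys g j).mp hc)) (by omega)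

lemma pvInsertModify (d : PySem.Dict Int (List Int)) (k : Int) (v d0 : List Int)
    (f : List Int → List Int) : (d.insert k v).modify k d0 f = d.insert k (f v) := by
  simp [PySem.Dict.modify, PySem.Dict.getD_insert_self, PySem.Dict.insert_insert_self]

lemma pvA_loop (m : Int) (t : Nat) (ht : (t : Int) = max m 1 - 1) :
    ∀ (p : List Int) (g : PySem.Dict Int (List Int)) (M : Int) (cur : List Int) (j : Nat),
      j ≤ t → (∀ k ∈ g.keys, k ≤ M) →
      (p.foldl (pvStepA m) ((if j = 0 then g else g.insert (M + 1) cur), M, (j : Int) + 1)).1.items =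
        if j = 0 then g.items ++ pvSpecGroups t (M + 1) p
        else g.items ++ (M + 1, cur ++ p.take (t + 1 - j)) :: pvSpecGroups t (M + 2) (p.drop (t + 1 - j)) := by
  intro p
  induction p with
  | nil =>
    intro g M cur j hj hk
    by_cases h0 : j = 0
    · simp [h0, pvSpecGroups]
    · simp only [List.foldl_nil, if_neg h0]
      rw [PySem.Dict.items_insert_of_not_contains _ _ (pvNotContains g M (M + 1) hk (by omega))]
      simp [pvSpecGroups]
  | cons x rest ih =>
    intro g M cur j hj hk
    rw [List.foldl_cons]
    have hk' : ∀ (w : List Int) (k : Int), k ∈ (g.insert (M + 1) w).keys → k ≤ M + 1 := by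
      intro w k hkm
      rcases (PySem.Dict.mem_keys_insert _ _ _ _).mp hkm with h | h
      · omega
      · exact le_trans (hk k h) (by omega)
    have hitems : ∀ (w : List Int), (g.insert (M + 1) w).items = g.items ++ [(M + 1, w)] :=
      fun w => PySem.Dict.items_insert_of_not_contains _ _ (pvNotContains g M (M + 1) hk (by omega))
    by_cases h0 : j = 0
    · subst h0
      rw [if_pos rfl,
        show pvStepA m (g, M, ((0 : Nat) : Int) + 1) x =
            if (0 : Int) + 1 + 1 > m then (g.insert (M + 1) [x], M + 1, 1)
            else (g.insert (M + 1) [x], M, (0 : Int) + 1 + 1) from by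
          norm_num [pvStepA, pvInsertModify]]
      by_cases hw : (0 : Int) + 1 + 1 > m
      · -- wrap: m ≤ 1, so t = 0 and every new group is a singleton
        rw [if_pos hw]
        have ht0 : t = 0 := by omega
        have H := ih (g.insert (M + 1) [x]) (M + 1) [] 0 (by omega) (hk' [x])
        rw [if_pos rfl, if_pos rfl] at H
        norm_num at H
        rw [show M + 1 + 1 = M + 2 by ring] at H
        rw [H, hitems]
        simp [pvSpecGroups, ht0, show M + 1 + 1 = M + 2 from by ring]
      · -- no wrap: m ≥ 2, so t ≥ 1 and the chunk continues
        rw [if_neg hw]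
        have ht1 : 1 ≤ t := by omega
        have H := ih g M [x] 1 ht1 hk
        rw [if_neg (by norm_num), if_neg (by norm_num)] at H
        rw [show (0 : Int) + 1 + 1 = ((1 : Nat) : Int) + 1 by norm_num, H]
        rw [if_pos rfl]
        have h1 : t + 1 - 1 = t := by omega
        simp [h1, pvSpecGroups, show M + 1 + 1 = M + 2 from by ring]
    · -- j ≥ 1: the group (M+1) is open with contents cur, counter is j+1 ≥ 2
      rw [if_neg h0,
        show pvStepA m (g.insert (M + 1) cur, M, ((j : Nat) : Int) + 1) x =
            if (j : Int) + 1 + 1 > m then (g.insert (M + 1) (cur ++ [x]), M + 1, 1)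
            else (g.insert (M + 1) (cur ++ [x]), M, (j : Int) + 1 + 1) from by
          norm_num [pvStepA, pvInsertModify, show ((j : Nat) : Int) + 1 ≠ 1 from by omega]]
      by_cases hw : (j : Int) + 1 + 1 > m
      · -- wrap: j = t, the open chunk is full after x
        rw [if_pos hw]
        have hjt : j = t := by omega
        have H := ih (g.insert (M + 1) (cur ++ [x])) (M + 1) [] 0 (by omega) (hk' (cur ++ [x]))
        rw [if_pos rfl, if_pos rfl] at H
        norm_num at H
        rw [show M + 1 + 1 = M + 2 by ring] at H
        rw [H, hitems]
        rw [if_neg h0]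
        have h1 : t + 1 - j = 1 := by omega
        simp [h1]
      · -- no wrap: j < t, the open chunk keeps growing
        rw [if_neg hw]
        have hjt : j < t := by omega
        have H := ih g M (cur ++ [x]) (j + 1) (by omega) hk
        rw [if_neg (by omega : ¬ j + 1 = 0), if_neg (by omega : ¬ j + 1 = 0)] at H
        rw [show (j : Int) + 1 + 1 = (((j + 1 : Nat)) : Int) + 1 by push_cast; ring, H]
        rw [if_neg h0]
        have h1 : t + 1 - j = (t - j) + 1 := by omega
        have h2 : t + 1 - (j + 1) = t - j := by omega
        simp [h1, h2]

lemma pvEnumShift (cs : List (List Int)) : ∀ (n : Int),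
    PySem.List.enumerate cs (n + 1) = (PySem.List.enumerate cs n).map (fun q => (q.1 + 1, q.2)) := by
  induction cs with
  | nil => intro n; simp [PySem.List.enumerate_nil]
  | cons c cs ih => intro n; simp [PySem.List.enumerate_cons, ih (n + 1)]

lemma pvChunksGoOut (t : Nat) : ∀ (n : Nat) (xs : List Int), xs.length ≤ n → ∀ (out : List (List Int)),
    pvChunksGo t out xs = out ++ pvChunksGo t [] xs := by
  intro n
  induction n with
  | zero =>
    intro xs hlen out
    have : xs = [] := List.length_eq_zero_iff.mp (Nat.le_zero.mp hlen)
    simp [this, pvChunksGo]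
  | succ n ih =>
    intro xs hlen out
    match xs with
    | [] => simp [pvChunksGo]
    | x :: rest =>
      rw [pvChunksGo, pvChunksGo]
      have hl : ((x :: rest).drop (t + 1)).length ≤ n := by simp at hlen ⊢; omega
      rw [ih _ hl (out ++ [(x :: rest).take (t + 1)]), ih _ hl ([] ++ [(x :: rest).take (t + 1)])]
      simp

lemma pvEnumChunks (t : Nat) : ∀ (n : Nat) (p : List Int), p.length ≤ n → ∀ (b : Int),
    (PySem.List.enumerate (pvChunksGo t [] p) 0).map (fun q => (b + 1 + q.1, q.2)) =
      pvSpecGroups t (b + 1) p := by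
  intro n
  induction n with
  | zero =>
    intro p hlen b
    have : p = [] := List.length_eq_zero_iff.mp (Nat.le_zero.mp hlen)
    simp [this, pvChunksGo, pvSpecGroups, PySem.List.enumerate_nil]
  | succ n ih =>
    intro p hlen b
    match p with
    | [] => simp [pvChunksGo, pvSpecGroups, PySem.List.enumerate_nil]
    | x :: rest =>
      rw [pvChunksGo]
      rw [pvChunksGoOut t (n + 1) _ (by simp at hlen ⊢; omega)]
      have hl : ((x :: rest).drop (t + 1)).length ≤ n := by simp at hlen ⊢; omega
      simp only [List.nil_append, List.singleton_append, PySem.List.enumerate_cons]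
      rw [show (0 : Int) + 1 = 0 + 1 by rfl, pvEnumShift]
      rw [List.map_cons, List.map_map]
      rw [pvSpecGroups]
      congr 1
      · simp [List.take_succ_cons]
      · rw [List.drop_succ_cons] at hl ⊢
        rw [← ih (rest.drop t) (by simpa using hl) (b + 1)]
        congr 1
        funext q
        simp [Function.comp]
        ring

lemma pvFilterFold (m : Int) (L : List Int) :
    ∀ (l : List Int) (st : PySem.Dict Int (List Int) × Int × Int),
      l.foldl (fun s idx => if idx ∈ L then s else pvStepA m s idx) st =
        (l.filter (fun i => decide (i ∉ L))).foldl (pvStepA m) st := by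
  intro l
  induction l with
  | nil => intro st; rfl
  | cons x rest ih =>
    intro st
    by_cases hx : x ∈ L
    · simp [hx, ih]
    · simp [hx, ih]

-- ===== VERDICT (by name: the statement is the Claim_ definition above) =====
theorem check_linear_term_spec : Claim_equal_check_linear_term := by
  intro cg lti m _ _
  show check_linear_term cg lti m = check_linear_term_alt cg lti m
  simp only [check_linear_term, check_linear_term_alt]
  cases hmax : PySem.List.max? (PySem.Dict.mk cg).keys (fun k => k) with
  | none => rfl
  | some base =>
    simp only []
    have hkeys : ∀ k ∈ (PySem.Dict.mk cg).keys, k ≤ base := PySem.List.max?_isMax hmax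
    set d : PySem.Dict Int (List Int) := PySem.Dict.mk cg with hd
    set L : List Int := d.values.foldl (fun acc v => acc ++ v) [] with hL
    have hLf : L = d.values.flatMap (fun v => v) := by
      rw [hL, PySem.List.foldl_append_eq_flatMap]; rfl
    have hpend : lti.filter (fun i => decide (i ∉ PySem.Set.ofList (d.values.flatMap (fun v => v)))) =
        lti.filter (fun i => decide (i ∉ L)) := by
      apply List.filter_congr
      intro a _
      simp [PySem.Set.mem_ofList, hLf]
    set pending : List Int := lti.filter (fun i => decide (i ∉ L)) with hp
    set t : Nat := (max m 1 - 1).toNat with htdef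
    have ht : (t : Int) = max m 1 - 1 := by rw [htdef]; omega
    -- A's loop: skip assigned indices, then run the counter loop over pending
    rw [pvFilterFold m L lti (d, base, 1)]
    have hA := pvA_loop m t ht pending d base [] 0 (by omega) hkeys
    rw [if_pos rfl, if_pos rfl] at hA
    norm_num at hA
    -- B's loop: the inserted keys are fresh and distinct, so the fold appends
    have hfresh : ∀ a ∈ PySem.List.enumerate (pvChunksGo t [] pending) 0,
        d.contains (base + 1 + a.1) = false := by
      intro a ha
      rcases (PySem.List.mem_enumerate_iff _ _ _).mp ha with ⟨k, hk, hak⟩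
      apply pvNotContains d base _ hkeys
      rw [hak]; simp; omega
    have hnodup : ((PySem.List.enumerate (pvChunksGo t [] pending) 0).map
        (fun a => base + 1 + a.1)).Nodup := by
      have hpw := PySem.List.pairwise_lt_enumerate (pvChunksGo t [] pending) 0
      exact List.Pairwise.map _ (fun a b h => by omega) hpw
    have hB := PySem.Dict.items_foldl_insert_fresh
      (PySem.List.enumerate (pvChunksGo t [] pending) 0)
      (fun a => base + 1 + a.1) (fun a => a.2) d hfresh hnodup
    have hE := pvEnumChunks t pending.length pending (le_refl _) base
    rw [hpend, ← hp, hA, hB, hE]
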